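-- pv_equiv track=rewrite | github.com/minstar/Healthcare_GYM | bioagents/gym/autonomous_gym.py | _pick_best_gpus
-- ===== SOURCE A (Python) =====
-- def _pick_best_gpus(free_ids: list[int], n: int) -> list[int]:
--     """Pick N GPUs, preferring contiguous blocks for NVLink.
--
--     Strategy: find the longest contiguous run that fits N,
--     otherwise just take the first N free.
--     """
--     if n == 1:
--         return [free_ids[0]]
--
--     # Try to find contiguous block
--     best_start = -1
--     best_len = 0
--     start = 0
--     for i in range(1, len(free_ids)):
--         if free_ids[i] == free_ids[i - 1] + 1:
--             if i - start + 1 > best_len: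
--                 best_start = start
--                 best_len = i - start + 1
--         else:
--             start = i
--
--     # Check last run
--     if len(free_ids) - start > best_len:
--         best_start = start
--         best_len = len(free_ids) - start
--
--     if best_len >= n:
--         return free_ids[best_start:best_start + n]
--
--     # No contiguous block, just take first N
--     return free_ids[:n]
-- ===== SOURCE B (Python) =====
-- def _pick_best_gpus(free_ids: list[int], n: int) -> list[int]:
--     """Pick N GPUs, preferring contiguous blocks for NVLink.
--
--     Build the list of maximal contiguous runs first, then take the
--     earliest longest run; slice N ids from it if it fits, else first N.
--     """
--     if n == 1:
--         return [free_ids[0]]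
--
--     # maximal contiguous runs as (start_index, length)
--     runs = []
--     i = 0
--     while i < len(free_ids):
--         j = i + 1
--         while j < len(free_ids) and free_ids[j] == free_ids[j - 1] + 1:
--             j += 1
--         runs.append((i, j - i))
--         i = j
--
--     if runs:
--         best_start, best_len = max(runs, key=lambda r: r[1])
--         if best_len >= n:
--             return free_ids[best_start:best_start + n]
--
--     return free_ids[:n]
-- ===== Notes on version B (the rewrite author's own statement) =====
-- stated objective: idiomatic
-- what changed: B first materialises the maximal contiguous runs as (start,length) pairs and then takes max(runs, key=length) (earliest on ties), instead of A's single index loop threading best_start/best_len/start state with a separate last-run patch-up after the loop.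
-- intended difference: For n<0 (never a real GPU count) with at least two free ids none of which are consecutive and len(free_ids)+n>=1, A's leftover loop state makes it slice from the LAST singleton run and return [], while B slices from the earliest run and returns free_ids[:n]; B's is the consistent choice since the earliest longest run is what both use everywhere else. — e.g. on _pick_best_gpus([5, 3], -1): A returns [], B returns [5]
import Mathlib
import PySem

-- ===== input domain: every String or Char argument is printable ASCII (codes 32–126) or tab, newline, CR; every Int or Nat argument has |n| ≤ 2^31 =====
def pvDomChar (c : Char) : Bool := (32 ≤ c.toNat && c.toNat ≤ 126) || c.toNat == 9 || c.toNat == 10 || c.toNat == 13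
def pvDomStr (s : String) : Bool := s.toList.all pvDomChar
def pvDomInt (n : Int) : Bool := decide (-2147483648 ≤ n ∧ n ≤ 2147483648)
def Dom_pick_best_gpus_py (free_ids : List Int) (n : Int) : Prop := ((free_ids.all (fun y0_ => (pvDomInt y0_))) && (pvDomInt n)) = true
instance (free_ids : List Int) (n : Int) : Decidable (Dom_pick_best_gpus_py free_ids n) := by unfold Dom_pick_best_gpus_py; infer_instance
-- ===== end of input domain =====

-- B replaces A's single index loop (threading best/start state plus a post-loop
-- last-run patch-up) by materialising the maximal contiguous runs and taking the
-- earliest longest one; objective: idiomatic, same O(n) cost.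

-- ===== PORT A =====
-- loop body of A's 'for i in range(1, len(free_ids))'; state = (best_start, best_len, start)
def pvAStep (free_ids : List Int) (st : Int × Int × Int) (i : Int) : Int × Int × Int :=
  if PySem.List.pyGetD free_ids i 0 = PySem.List.pyGetD free_ids (i - 1) 0 + 1 then
    (if i - st.2.2 + 1 > st.2.1 then (st.2.2, i - st.2.2 + 1, st.2.2) else st)
  else (st.1, st.2.1, i)

def pick_best_gpus_py (free_ids : List Int) (n : Int) : List Int :=
  if n = 1 then [PySem.List.pyGetD free_ids 0 0]
  else
    let st := (PySem.List.pyRange 1 (free_ids.length : Int) 1).foldl (pvAStep free_ids) (-1, 0, 0)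
    -- check last run
    let st2 := if (free_ids.length : Int) - st.2.2 > st.2.1 then (st.2.2, (free_ids.length : Int) - st.2.2) else (st.1, st.2.1)
    if st2.2 ≥ n then PySem.List.slice free_ids (some st2.1) (some (st2.1 + n))
    else PySem.List.slice free_ids none (some n)

-- ===== PORT B =====
-- inner while: advance j while free_ids[j] == free_ids[j-1] + 1
def pvRunEnd (free_ids : List Int) (j : Nat) : Nat :=
  if h : j < free_ids.length ∧ free_ids.getD j 0 = free_ids.getD (j - 1) 0 + 1 then
    pvRunEnd free_ids (j + 1)
  else j
termination_by free_ids.length - j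

-- needed by pvRuns' termination proof
theorem pvRunEnd_ge (free_ids : List Int) (j : Nat) : j ≤ pvRunEnd free_ids j := by
  fun_induction pvRunEnd free_ids j with
  | case1 j h ih => omega
  | case2 j h => omega

-- outer while: collect the maximal runs as (start, length) pairs
def pvRuns (free_ids : List Int) (i : Nat) : List (Nat × Nat) :=
  if h : i < free_ids.length then
    (i, pvRunEnd free_ids (i + 1) - i) :: pvRuns free_ids (pvRunEnd free_ids (i + 1))
  else []
termination_by free_ids.length - i
decreasing_by have := pvRunEnd_ge free_ids (i + 1); omega

-- max(runs, key=lambda r: r[1]) keeps the first maximal element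
def pvBStep (b q : Nat × Nat) : Nat × Nat := if q.2 > b.2 then q else b

def pick_best_gpus_py_alt (free_ids : List Int) (n : Int) : List Int :=
  if n = 1 then [PySem.List.pyGetD free_ids 0 0]
  else
    match pvRuns free_ids 0 with
    | [] => PySem.List.slice free_ids none (some n)
    | r :: rs =>
      let best := rs.foldl pvBStep r
      if (best.2 : Int) ≥ n then
        PySem.List.slice free_ids (some (best.1 : Int)) (some ((best.1 : Int) + n))
      else PySem.List.slice free_ids none (some n)

-- ===== PRECONDITION & SPEC =====
-- Pre_ excludes only (free_ids = [], n = 1), where Python A raises IndexError on free_ids[0] (B raises too).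
def Pre_pick_best_gpus_py (free_ids : List Int) (n : Int) : Prop := ¬(free_ids = [] ∧ n = 1)
instance (free_ids : List Int) (n : Int) : Decidable (Pre_pick_best_gpus_py free_ids n) := by unfold Pre_pick_best_gpus_py; infer_instance
def pvWitness_pick_best_gpus_py : List Int × Int := ([0, 1], 2)

-- For n < 0 (never a real GPU count) with at least two free ids, none of them consecutive, and len+n ≥ 1,
-- A's leftover loop state slices from the LAST singleton run and returns [], while B slices from the
-- earliest run and returns free_ids[:n]; B's is the consistent choice (the earliest longest run, as everywhere else).
def D_pick_best_gpus_py (free_ids : List Int) (n : Int) : Prop :=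
  n < 0 ∧ 2 ≤ free_ids.length ∧ 1 ≤ (free_ids.length : Int) + n ∧
    ∀ t : Nat, t < free_ids.length → 1 ≤ t → free_ids.getD t 0 ≠ free_ids.getD (t - 1) 0 + 1
instance (free_ids : List Int) (n : Int) : Decidable (D_pick_best_gpus_py free_ids n) := by unfold D_pick_best_gpus_py; infer_instance

def Spec_pick_best_gpus_py (free_ids : List Int) (n : Int) (out : List Int) : Prop := ¬ D_pick_best_gpus_py free_ids n → out = pick_best_gpus_py_alt free_ids n
instance (free_ids : List Int) (n : Int) (out : List Int) : Decidable (Spec_pick_best_gpus_py free_ids n out) := by unfold Spec_pick_best_gpus_py; infer_instance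

def pvDiffWitness_pick_best_gpus_py : List Int × Int := ([5, 3], -1)
def pvDiffWitnessOut_pick_best_gpus_py : (List Int) × (List Int) := ([], [5])

-- ===== CLAIM (what is proved, stated in full; the proofs are below) =====
def Claim_unchanged_pick_best_gpus_py : Prop := ∀ (free_ids : List Int) (n : Int), Dom_pick_best_gpus_py free_ids n → Pre_pick_best_gpus_py free_ids n → Spec_pick_best_gpus_py free_ids n (pick_best_gpus_py free_ids n)
def Claim_changed_pick_best_gpus_py : Prop := Dom_pick_best_gpus_py (pvDiffWitness_pick_best_gpus_py.1) (pvDiffWitness_pick_best_gpus_py.2) ∧ Pre_pick_best_gpus_py (pvDiffWitness_pick_best_gpus_py.1) (pvDiffWitness_pick_best_gpus_py.2) ∧ D_pick_best_gpus_py (pvDiffWitness_pick_best_gpus_py.1) (pvDiffWitness_pick_best_gpus_py.2) ∧ pick_best_gpus_py (pvDiffWitness_pick_best_gpus_py.1) (pvDiffWitness_pick_best_gpus_py.2) = pvDiffWitnessOut_pick_best_gpus_py.1 ∧ pick_best_gpus_py_alt (pvDiffWitness_pick_best_gpus_py.1) (pvDiffWitness_pick_best_gpus_py.2) = pvDiffWitnessOut_pick_best_gpus_py.2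 ∧ pvDiffWitnessOut_pick_best_gpus_py.1 ≠ pvDiffWitnessOut_pick_best_gpus_py.2
def Claim_exact_pick_best_gpus_py : Prop := ∀ (free_ids : List Int) (n : Int), Dom_pick_best_gpus_py free_ids n → Pre_pick_best_gpus_py free_ids n → D_pick_best_gpus_py free_ids n → pick_best_gpus_py free_ids n ≠ pick_best_gpus_py_alt free_ids n

-- ===== LEMMAS AND PROOFS =====

-- A's loop effect of one whole run, abstracted: strict '>' update, runs of length ≥ 2 only
def pvBestStep (b : Int × Int) (r : Nat × Nat) : Int × Int :=
  if 2 ≤ r.2 ∧ (r.2 : Int) > b.2 then ((r.1 : Int), (r.2 : Int)) else b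

-- start index of the last maximal run
def pvLastStart (free_ids : List Int) (i : Nat) : Nat :=
  if h : i < free_ids.length then
    if h2 : pvRunEnd free_ids (i + 1) < free_ids.length then pvLastStart free_ids (pvRunEnd free_ids (i + 1)) else i
  else i
termination_by free_ids.length - i
decreasing_by have := pvRunEnd_ge free_ids (i + 1); omega

theorem pvRunEnd_le (free_ids : List Int) (j : Nat) (h : j ≤ free_ids.length) :
    pvRunEnd free_ids j ≤ free_ids.length := by
  fun_induction pvRunEnd free_ids j with
  | case1 j h1 ih => exact ih (by omega)
  | case2 j h1 => exact h

theorem pvRunEnd_incr (free_ids : List Int) (j t : Nat) (h1 : j ≤ t) (h2 : t < pvRunEnd free_ids j) :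
    free_ids.getD t 0 = free_ids.getD (t - 1) 0 + 1 := by
  fun_induction pvRunEnd free_ids j with
  | case1 j hc ih =>
    rcases Nat.eq_or_lt_of_le h1 with he | hl
    · subst he; exact hc.2
    · exact ih hl h2
  | case2 j hc => omega

theorem pvRunEnd_stop (free_ids : List Int) (j : Nat) (h : pvRunEnd free_ids j < free_ids.length) :
    ¬ free_ids.getD (pvRunEnd free_ids j) 0 = free_ids.getD (pvRunEnd free_ids j - 1) 0 + 1 := by
  fun_induction pvRunEnd free_ids j with
  | case1 j hc ih => exact ih h
  | case2 j hc => intro he; exact hc ⟨h, he⟩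

-- the A-fold over the interior of one run
theorem pv_run_fold (xs : List Int) (i j : Nat) (bs bl : Int) (hij : i + 1 ≤ j)
    (hinc : ∀ t : Nat, i + 1 ≤ t → t < j → xs.getD t 0 = xs.getD (t - 1) 0 + 1) :
    (PySem.List.pyRange ((i : Int) + 1) (j : Int) 1).foldl (pvAStep xs) (bs, bl, (i : Int)) =
      ((pvBestStep (bs, bl) (i, j - i)).1, (pvBestStep (bs, bl) (i, j - i)).2, (i : Int)) := by
  induction j, hij using Nat.le_induction with
  | base =>
    rw [PySem.List.pyRange_one_eq_nil (by omega)]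
    simp only [List.foldl_nil, pvBestStep]
    rw [if_neg (by omega)]
  | succ j hj ihj =>
    have hcast : ((j + 1 : Nat) : Int) = (j : Int) + 1 := by push_cast; ring
    rw [hcast, PySem.List.pyRange_one_succ_right (by omega), List.foldl_append,
      ihj (fun t ht1 ht2 => hinc t ht1 (by omega))]
    have hj1 : ((j : Int)) - 1 = ((j - 1 : Nat) : Int) := by omega
    have hstep := hinc j (by omega) (by omega)
    by_cases hprev : 2 ≤ j - i ∧ ((j - i : Nat) : Int) > bl
    · have hB : pvBestStep (bs, bl) (i, j - i) = ((i : Int), ((j - i : Nat) : Int)) := by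
        unfold pvBestStep; rw [if_pos (by exact hprev)]
      have hB' : pvBestStep (bs, bl) (i, j + 1 - i) = ((i : Int), ((j + 1 - i : Nat) : Int)) := by
        unfold pvBestStep; rw [if_pos (by constructor <;> omega)]
      rw [hB, hB']
      simp only [List.foldl_cons, List.foldl_nil, pvAStep, hj1, PySem.List.pyGetD_natCast]
      rw [if_pos (by exact hstep), if_pos (by omega)]
      simp only [Prod.mk.injEq]
      refine ⟨trivial, by omega, trivial⟩
    · have hB : pvBestStep (bs, bl) (i, j - i) = (bs, bl) := by
        unfold pvBestStep; rw [if_neg (by exact hprev)]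
      rw [hB]
      simp only [List.foldl_cons, List.foldl_nil, pvAStep, hj1, PySem.List.pyGetD_natCast]
      rw [if_pos (by exact hstep)]
      by_cases hnew : (j : Int) - (i : Int) + 1 > bl
      · have hB' : pvBestStep (bs, bl) (i, j + 1 - i) = ((i : Int), ((j + 1 - i : Nat) : Int)) := by
          unfold pvBestStep; rw [if_pos (by constructor <;> omega)]
        rw [hB', if_pos (by omega)]
        simp only [Prod.mk.injEq]
        refine ⟨trivial, by omega, trivial⟩
      · have hB' : pvBestStep (bs, bl) (i, j + 1 - i) = (bs, bl) := by
          unfold pvBestStep; rw [if_neg (by omega)]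
        rw [hB', if_neg (by omega)]

-- A's whole loop, started at a run start i, in terms of the runs of free_ids from i
theorem pv_outer (xs : List Int) (i : Nat) (bs bl : Int) (h : i < xs.length) :
    (PySem.List.pyRange ((i : Int) + 1) (xs.length : Int) 1).foldl (pvAStep xs) (bs, bl, (i : Int)) =
      (((pvRuns xs i).foldl pvBestStep (bs, bl)).1, ((pvRuns xs i).foldl pvBestStep (bs, bl)).2,
        ((pvLastStart xs i : Nat) : Int)) := by
  have main : ∀ k i bs bl, xs.length - i = k → i < xs.length →
      (PySem.List.pyRange ((i : Int) + 1) (xs.length : Int) 1).foldl (pvAStep xs) (bs, bl, (i : Int)) =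
        (((pvRuns xs i).foldl pvBestStep (bs, bl)).1, ((pvRuns xs i).foldl pvBestStep (bs, bl)).2,
          ((pvLastStart xs i : Nat) : Int)) := by
    intro k
    induction k using Nat.strong_induction_on with
    | _ k ih =>
      intro i bs bl hk h
      have hji : i + 1 ≤ pvRunEnd xs (i + 1) := pvRunEnd_ge xs (i + 1)
      have hjL : pvRunEnd xs (i + 1) ≤ xs.length := pvRunEnd_le xs (i + 1) (by omega)
      set j := pvRunEnd xs (i + 1) with hj
      rw [PySem.List.pyRange_one_append ((i : Int) + 1) (j : Int) (xs.length : Int)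
            (by omega) (by omega), List.foldl_append,
          pv_run_fold xs i j bs bl hji (fun t ht1 ht2 => pvRunEnd_incr xs (i + 1) t ht1 ht2)]
      rw [pvRuns, dif_pos h, List.foldl_cons, ← hj]
      by_cases h2 : j < xs.length
      · have hstop := pvRunEnd_stop xs (i + 1) (by rw [← hj]; exact h2)
        rw [← hj] at hstop
        have hls : pvLastStart xs i = pvLastStart xs j := by
          rw [pvLastStart, dif_pos h, dif_pos (by rw [← hj]; exact h2)]
        rw [hls]
        rw [PySem.List.pyRange_one_cons (by omega), List.foldl_cons]
        have hj1 : ((j : Int)) - 1 = ((j - 1 : Nat) : Int) := by omega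
        have hAstep : pvAStep xs ((pvBestStep (bs, bl) (i, j - i)).1, (pvBestStep (bs, bl) (i, j - i)).2, (i : Int)) (j : Int) =
            ((pvBestStep (bs, bl) (i, j - i)).1, (pvBestStep (bs, bl) (i, j - i)).2, (j : Int)) := by
          simp only [pvAStep, hj1, PySem.List.pyGetD_natCast]
          rw [if_neg hstop]
        rw [hAstep]
        exact ih (xs.length - j) (by omega) j (pvBestStep (bs, bl) (i, j - i)).1
          (pvBestStep (bs, bl) (i, j - i)).2 rfl h2
      · have hls : pvLastStart xs i = i := by
          rw [pvLastStart, dif_pos h, dif_neg (by rw [← hj]; exact h2)]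
        rw [hls]
        rw [PySem.List.pyRange_one_eq_nil (by omega), List.foldl_nil]
        have hnil : pvRuns xs j = [] := by rw [pvRuns, dif_neg h2]
        rw [hnil, List.foldl_nil]
  exact main (xs.length - i) i bs bl rfl h

theorem pvRuns_len_pos (xs : List Int) (i : Nat) : ∀ r ∈ pvRuns xs i, 1 ≤ r.2 := by
  have main : ∀ k i, xs.length - i = k → ∀ r ∈ pvRuns xs i, 1 ≤ r.2 := by
    intro k
    induction k using Nat.strong_induction_on with
    | _ k ih =>
      intro i hk r hr
      rw [pvRuns] at hr
      by_cases h : i < xs.length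
      · rw [dif_pos h] at hr
        have hji := pvRunEnd_ge xs (i + 1)
        rcases List.mem_cons.mp hr with he | hr'
        · subst he; simp; omega
        · exact ih (xs.length - pvRunEnd xs (i + 1)) (by omega) _ rfl r hr'
      · rw [dif_neg h] at hr; cases hr
  exact main (xs.length - i) i rfl

theorem pvRuns_head (xs : List Int) (i : Nat) (h : i < xs.length) :
    ∃ l rs, pvRuns xs i = (i, l) :: rs :=
  ⟨_, _, by rw [pvRuns, dif_pos h]⟩

theorem pvRuns_last (xs : List Int) (i : Nat) (h : i < xs.length) :
    (pvRuns xs i).getLast? = some (pvLastStart xs i, xs.length - pvLastStart xs i) := by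
  have main : ∀ k i, xs.length - i = k → i < xs.length →
      (pvRuns xs i).getLast? = some (pvLastStart xs i, xs.length - pvLastStart xs i) := by
    intro k
    induction k using Nat.strong_induction_on with
    | _ k ih =>
      intro i hk h
      have hji := pvRunEnd_ge xs (i + 1)
      have hjL := pvRunEnd_le xs (i + 1) (by omega)
      rw [pvRuns, dif_pos h, pvLastStart, dif_pos h]
      by_cases h2 : pvRunEnd xs (i + 1) < xs.length
      · rw [dif_pos h2]
        have hrec := ih (xs.length - pvRunEnd xs (i + 1)) (by omega) _ rfl h2
        rw [List.getLast?_cons, hrec]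
        simp
      · rw [dif_neg h2]
        have hnil : pvRuns xs (pvRunEnd xs (i + 1)) = [] := by rw [pvRuns, dif_neg h2]
        rw [hnil]
        simp
        omega
  exact main (xs.length - i) i rfl h

theorem pvLastStart_lt (xs : List Int) (i : Nat) (h : i < xs.length) : pvLastStart xs i < xs.length := by
  have main : ∀ k i, xs.length - i = k → i < xs.length → pvLastStart xs i < xs.length := by
    intro k
    induction k using Nat.strong_induction_on with
    | _ k ih =>
      intro i hk h
      have hji := pvRunEnd_ge xs (i + 1)
      rw [pvLastStart, dif_pos h]
      by_cases h2 : pvRunEnd xs (i + 1) < xs.length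
      · rw [dif_pos h2]; exact ih (xs.length - pvRunEnd xs (i + 1)) (by omega) _ rfl h2
      · rw [dif_neg h2]; exact h
  exact main (xs.length - i) i rfl h

theorem pv_singl_noncons (xs : List Int) (i : Nat) (h : i < xs.length)
    (hs : ∀ r ∈ pvRuns xs i, r.2 = 1) :
    ∀ t : Nat, i + 1 ≤ t → t < xs.length → xs.getD t 0 ≠ xs.getD (t - 1) 0 + 1 := by
  have main : ∀ k i, xs.length - i = k → i < xs.length → (∀ r ∈ pvRuns xs i, r.2 = 1) →
      ∀ t : Nat, i + 1 ≤ t → t < xs.length → xs.getD t 0 ≠ xs.getD (t - 1) 0 + 1 := by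
    intro k
    induction k using Nat.strong_induction_on with
    | _ k ih =>
      intro i hk h hs t ht1 ht2
      have hji := pvRunEnd_ge xs (i + 1)
      have hmem : (i, pvRunEnd xs (i + 1) - i) ∈ pvRuns xs i := by
        rw [pvRuns, dif_pos h]; simp
      have hlen := hs _ hmem
      simp only at hlen
      have hje : pvRunEnd xs (i + 1) = i + 1 := by omega
      have hrest : ∀ r ∈ pvRuns xs (i + 1), r.2 = 1 := by
        intro r hr
        apply hs
        rw [pvRuns, dif_pos h, hje]
        simp [hr]
      rcases Nat.eq_or_lt_of_le ht1 with he | hl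
      · have hst := pvRunEnd_stop xs (i + 1) (by rw [hje]; omega)
        rw [hje] at hst
        subst he; exact hst
      · exact ih (xs.length - (i + 1)) (by omega) (i + 1) rfl (by omega) hrest t (by omega) ht2
  exact main (xs.length - i) i rfl h hs

theorem pv_noncons_singl (xs : List Int) (i : Nat)
    (hnc : ∀ t : Nat, t < xs.length → 1 ≤ t → xs.getD t 0 ≠ xs.getD (t - 1) 0 + 1) :
    ∀ r ∈ pvRuns xs i, r.2 = 1 := by
  have hre : ∀ j : Nat, 1 ≤ j → pvRunEnd xs j = j := by
    intro j hj
    rw [pvRunEnd, dif_neg]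
    intro ⟨hc1, hc2⟩
    exact hnc j hc1 hj hc2
  have main : ∀ k i, xs.length - i = k → ∀ r ∈ pvRuns xs i, r.2 = 1 := by
    intro k
    induction k using Nat.strong_induction_on with
    | _ k ih =>
      intro i hk r hr
      rw [pvRuns] at hr
      by_cases h : i < xs.length
      · rw [dif_pos h, hre (i + 1) (by omega)] at hr
        rcases List.mem_cons.mp hr with he | hr'
        · subst he; simp
        · exact ih (xs.length - (i + 1)) (by omega) _ rfl r hr'
      · rw [dif_neg h] at hr; cases hr
  exact main (xs.length - i) i rfl

-- the two best-folds, related: either equal (and a run of length ≥ 2 was seen) or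
-- A's is still the initial (-1, 0) and B's best has length 1
theorem pv_fold_rel (rs : List (Nat × Nat)) (a : Int × Int) (b : Nat × Nat)
    (hR : (a.1 = (b.1 : Int) ∧ a.2 = (b.2 : Int) ∧ 2 ≤ b.2) ∨ (a.1 = -1 ∧ a.2 = 0 ∧ b.2 = 1)) :
    ((rs.foldl pvBestStep a).1 = ((rs.foldl pvBStep b).1 : Int) ∧
       (rs.foldl pvBestStep a).2 = ((rs.foldl pvBStep b).2 : Int) ∧ 2 ≤ (rs.foldl pvBStep b).2) ∨
      ((rs.foldl pvBestStep a).1 = -1 ∧ (rs.foldl pvBestStep a).2 = 0 ∧ (rs.foldl pvBStep b).2 = 1) := by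
  induction rs generalizing a b with
  | nil => exact hR
  | cons q rs ih =>
    simp only [List.foldl_cons]
    apply ih
    unfold pvBestStep pvBStep
    rcases hR with ⟨h1, h2, h3⟩ | ⟨h1, h2, h3⟩
    · by_cases hq : q.2 > b.2
      · rw [if_pos (by constructor <;> omega), if_pos hq]
        left; exact ⟨by simp, by simp, by omega⟩
      · rw [if_neg (by omega), if_neg hq]
        left; exact ⟨h1, h2, h3⟩
    · by_cases hq : 2 ≤ q.2
      · rw [if_pos (by constructor <;> omega), if_pos (by omega)]
        left; exact ⟨by simp, by simp, hq⟩
      · rw [if_neg (by omega), if_neg (by omega)]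
        right; exact ⟨h1, h2, h3⟩

theorem pvBStep_fold_le_seed (rs : List (Nat × Nat)) (b : Nat × Nat) : b.2 ≤ (rs.foldl pvBStep b).2 := by
  induction rs generalizing b with
  | nil => simp
  | cons r rs ih =>
    simp only [List.foldl_cons]
    refine le_trans ?_ (ih (pvBStep b r))
    unfold pvBStep; split <;> omega

theorem pvBStep_fold_le_mem (rs : List (Nat × Nat)) (b : Nat × Nat) :
    ∀ r ∈ rs, r.2 ≤ (rs.foldl pvBStep b).2 := by
  induction rs generalizing b with
  | nil => simp
  | cons q rs ih =>
    intro r hr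
    rcases List.mem_cons.mp hr with rfl | hr'
    · simp only [List.foldl_cons]
      refine le_trans ?_ (pvBStep_fold_le_seed rs (pvBStep b r))
      unfold pvBStep; split <;> omega
    · exact ih (pvBStep b q) r hr'

theorem pv_fold_best_singl (rs : List (Nat × Nat)) (hs : ∀ r ∈ rs, r.2 = 1) :
    rs.foldl pvBestStep (-1, 0) = (-1, 0) := by
  induction rs with
  | nil => rfl
  | cons q rs ih =>
    have hq := hs q (by simp)
    simp only [List.foldl_cons]
    have he : pvBestStep (-1, 0) q = (-1, 0) := by unfold pvBestStep; rw [if_neg (by omega)]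
    rw [he]
    exact ih (fun r hr => hs r (by simp [hr]))

theorem pv_fold_b_singl (rs : List (Nat × Nat)) (b : Nat × Nat) (hb : b.2 = 1)
    (hs : ∀ r ∈ rs, r.2 = 1) : rs.foldl pvBStep b = b := by
  induction rs with
  | nil => rfl
  | cons q rs ih =>
    have hq := hs q (by simp)
    simp only [List.foldl_cons]
    have he : pvBStep b q = b := by unfold pvBStep; rw [if_neg (by omega)]
    rw [he]
    exact ih (fun r hr => hs r (by simp [hr]))

theorem pv_slice_nil (a b : Option Int) : PySem.List.slice ([] : List Int) a b = [] := by
  cases a <;> cases b <;> simp [PySem.List.slice, PySem.List.clampIdx]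

-- slicing from a nonnegative start to a stop not beyond it is empty
theorem pv_slice_empty (xs : List Int) (a b : Int) (ha : 0 ≤ a) (hb : 0 ≤ b) (hba : b ≤ a) :
    PySem.List.slice xs (some a) (some b) = [] := by
  rw [PySem.List.slice_toNat xs ha hb]
  have : b.toNat - a.toNat = 0 := by omega
  rw [this, List.take_zero]

-- the main equivalence outside D_
theorem pv_main (xs : List Int) (n : Int) (hnd : ¬ D_pick_best_gpus_py xs n) :
    pick_best_gpus_py xs n = pick_best_gpus_py_alt xs n := by
  by_cases hn1 : n = 1
  · subst hn1
    rw [pick_best_gpus_py, pick_best_gpus_py_alt, if_pos rfl, if_pos rfl]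
  · simp only [pick_best_gpus_py, pick_best_gpus_py_alt, if_neg hn1]
    rcases eq_or_ne xs [] with rfl | hne
    · have hruns : pvRuns ([] : List Int) 0 = [] := by rw [pvRuns]; simp
      rw [hruns]
      simp only [List.length_nil, Nat.cast_zero]
      rw [PySem.List.pyRange_one_eq_nil (by omega), List.foldl_nil]
      norm_num [pv_slice_nil]
    · have h0 : 0 < xs.length := List.length_pos_iff.mpr hne
      have houter := pv_outer xs 0 (-1) 0 h0
      norm_num at houter
      rw [houter]
      obtain ⟨l0, rs, hruns⟩ := pvRuns_head xs 0 h0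
      have hl0 : 1 ≤ l0 := by
        have := pvRuns_len_pos xs 0 (0, l0) (by rw [hruns]; simp)
        simpa using this
      have hsl : pvLastStart xs 0 < xs.length := pvLastStart_lt xs 0 h0
      have hlast := pvRuns_last xs 0 h0
      have hlastmem : (pvLastStart xs 0, xs.length - pvLastStart xs 0) ∈ pvRuns xs 0 :=
        List.mem_of_getLast? hlast
      rw [hruns, List.foldl_cons]
      have hseed : ((pvBestStep (-1, 0) (0, l0)).1 = (((0, l0) : Nat × Nat).1 : Int) ∧
            (pvBestStep (-1, 0) (0, l0)).2 = (((0, l0) : Nat × Nat).2 : Int) ∧ 2 ≤ ((0, l0) : Nat × Nat).2) ∨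
          ((pvBestStep (-1, 0) (0, l0)).1 = -1 ∧ (pvBestStep (-1, 0) (0, l0)).2 = 0 ∧ ((0, l0) : Nat × Nat).2 = 1) := by
        by_cases h2 : 2 ≤ l0
        · left
          unfold pvBestStep
          rw [if_pos (by constructor <;> simp <;> omega)]
          exact ⟨by simp, by simp, h2⟩
        · right
          unfold pvBestStep
          rw [if_neg (by simp; omega)]
          exact ⟨rfl, rfl, by simp; omega⟩
      have hrel := pv_fold_rel rs (pvBestStep (-1, 0) (0, l0)) (0, l0) hseed
      set F := rs.foldl pvBestStep (pvBestStep (-1, 0) (0, l0)) with hF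
      set BP := rs.foldl pvBStep (0, l0) with hBP
      set s := pvLastStart xs 0 with hs
      dsimp only
      have hBPmem : ∀ r ∈ pvRuns xs 0, r.2 ≤ BP.2 := by
        intro r hr
        rw [hruns] at hr
        rcases List.mem_cons.mp hr with rfl | hr'
        · simpa using pvBStep_fold_le_seed rs (0, l0)
        · exact pvBStep_fold_le_mem rs (0, l0) r hr'
      have hlastlen : xs.length - s ≤ BP.2 := hBPmem _ hlastmem
      rcases hrel with ⟨e1, e2, e3⟩ | ⟨e1, e2, e3⟩
      · -- a run of length ≥ 2 exists: the final best pairs coincide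
        rw [if_neg (show ¬((xs.length : Int) - (s : Int) > F.2) by rw [e2]; omega)]
        dsimp only
        rw [e1, e2]
      · -- all runs are singletons
        have hlast1 : xs.length - s = 1 := by omega
        have hseed2 : l0 ≤ BP.2 := by simpa using pvBStep_fold_le_seed rs (0, l0)
        have hl0e : l0 = 1 := by omega
        have hrs1 : ∀ r ∈ rs, r.2 = 1 := by
          intro r hr
          have h1 : r.2 ≤ BP.2 := pvBStep_fold_le_mem rs (0, l0) r hr
          have h2 := pvRuns_len_pos xs 0 r (by rw [hruns]; exact List.mem_cons_of_mem _ hr)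
          omega
        have hBPe : BP = (0, 1) := by
          rw [hBP, hl0e]
          exact pv_fold_b_singl rs (0, 1) rfl hrs1
        rw [if_pos (show (xs.length : Int) - (s : Int) > F.2 by rw [e2]; omega)]
        dsimp only
        rw [← hBP, hBPe]
        dsimp only
        have hcast1 : (xs.length : Int) - (s : Int) = 1 := by omega
        rw [hcast1]
        norm_num
        intro hn2
        have hn0 : n ≤ 0 := by omega
        rcases Nat.lt_or_ge 1 xs.length with hL2 | hL1
        · -- at least two elements, all runs singletons
          have hsall : ∀ r ∈ pvRuns xs 0, r.2 = 1 := by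
            intro r hr
            rw [hruns] at hr
            rcases List.mem_cons.mp hr with rfl | hr'
            · simpa using hl0e
            · exact hrs1 r hr'
          have hnc := pv_singl_noncons xs 0 h0 hsall
          have hse : s = xs.length - 1 := by omega
          rcases lt_or_eq_of_le hn0 with hneg | hzero
          · -- n < 0 and no consecutive pair: ¬D forces len + n ≤ 0, both slices empty
            have hLn : (xs.length : Int) + n ≤ 0 := by
              by_contra hc
              exact hnd ⟨hneg, by omega, by omega, fun t ht1 ht2 => hnc t (by omega) ht1⟩
            have hAnil : PySem.List.slice xs (some (s : Int)) (some ((s : Int) + n)) = [] := by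
              set k : Nat := (-((s : Int) + n)).toNat with hkdef
              have hk : 0 < k := by omega
              have hb : ((s : Int)) + n = -(k : Int) := by omega
              rw [hb]
              apply List.eq_nil_of_length_eq_zero
              rw [PySem.List.length_slice, PySem.List.clampIdx_neg_natCast _ k hk,
                PySem.List.clampIdx_natCast]
              omega
            have hBnil : PySem.List.slice xs none (some n) = [] := by
              set k' : Nat := (-n).toNat with hkdef'
              have hk' : 0 < k' := by omega
              have hb : n = -(k' : Int) := by omega
              rw [hb, PySem.List.slice_to_neg_natCast xs k' hk']
              have : xs.length - k' = 0 := by omega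
              rw [this, List.take_zero]
            rw [hAnil, hBnil]
          · -- n = 0: both slices empty
            subst hzero
            rw [pv_slice_empty xs (s : Int) ((s : Int) + 0) (by omega) (by omega) (by omega)]
            rw [PySem.List.slice_to xs (le_refl 0)]
            simp
        · -- a single element: s = 0 and the two slices coincide syntactically
          have hse : s = 0 := by omega
          rw [hse]
          norm_num


theorem pv_tight (xs : List Int) (n : Int) (hd : D_pick_best_gpus_py xs n) :
    pick_best_gpus_py xs n ≠ pick_best_gpus_py_alt xs n := by
  obtain ⟨hneg, hL2, hLn, hnc⟩ := hd
  have hn1 : ¬ n = 1 := by omega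
  have h0 : 0 < xs.length := by omega
  have hne : xs ≠ [] := by
    intro h
    rw [h] at hL2
    simp at hL2
  simp only [pick_best_gpus_py, pick_best_gpus_py_alt, if_neg hn1]
  have houter := pv_outer xs 0 (-1) 0 h0
  norm_num at houter
  rw [houter]
  obtain ⟨l0, rs, hruns⟩ := pvRuns_head xs 0 h0
  have hsall : ∀ r ∈ pvRuns xs 0, r.2 = 1 := pv_noncons_singl xs 0 hnc
  have hl0e : l0 = 1 := by simpa using hsall (0, l0) (by rw [hruns]; simp)
  have hrs1 : ∀ r ∈ rs, r.2 = 1 := fun r hr => hsall r (by rw [hruns]; exact List.mem_cons_of_mem _ hr)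
  have hFe : (pvRuns xs 0).foldl pvBestStep (-1, 0) = (-1, 0) := pv_fold_best_singl _ hsall
  rw [hFe, hruns]
  dsimp only
  rw [hl0e, pv_fold_b_singl rs (0, 1) rfl hrs1]
  dsimp only
  set s := pvLastStart xs 0 with hs
  have hsl : s < xs.length := pvLastStart_lt xs 0 h0
  have hlast := pvRuns_last xs 0 h0
  have hlastmem : (s, xs.length - s) ∈ pvRuns xs 0 := List.mem_of_getLast? hlast
  have hlast1 : xs.length - s = 1 := by simpa using hsall _ hlastmem
  have hse : s = xs.length - 1 := by omega
  rw [if_pos (show (xs.length : Int) - (s : Int) > 0 by omega)]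
  dsimp only
  rw [if_pos (show (xs.length : Int) - (s : Int) ≥ n by omega)]
  rw [if_pos (show ((1 : Nat) : Int) ≥ n by omega)]
  rw [pv_slice_empty xs (s : Int) ((s : Int) + n) (by omega) (by omega) (by omega)]
  norm_num
  set k' : Nat := (-n).toNat with hk'
  have hkpos : 0 < k' := by omega
  have hb : n = -(k' : Int) := by omega
  rw [hb, PySem.List.slice_to_neg_natCast xs k' hkpos]
  intro heq
  have hlen := congrArg List.length heq.symm
  rw [List.length_take] at hlen
  simp at hlen
  omega

-- ===== VERDICT (by name: the statement is the Claim_ definition above) =====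
theorem pick_best_gpus_py_spec : Claim_unchanged_pick_best_gpus_py := by
  intro xs n _ _ hnd
  exact pv_main xs n hnd

theorem pick_best_gpus_py_changed : Claim_changed_pick_best_gpus_py := by
  unfold Claim_changed_pick_best_gpus_py
  refine ⟨by decide, by decide, by decide, by decide, ?_, by decide⟩
  show pick_best_gpus_py_alt [5, 3] (-1) = [5]
  have h1 : pvRuns [5, 3] 0 = [(0, 1), (1, 1)] := by
    rw [pvRuns, pvRunEnd, pvRunEnd]; norm_num
    rw [pvRuns, pvRunEnd]; norm_num
    rw [pvRuns]; norm_num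
  rw [pick_best_gpus_py_alt]
  norm_num [h1, pvBStep, PySem.List.slice, PySem.List.clampIdx]

theorem pick_best_gpus_py_tight : Claim_exact_pick_best_gpus_py := by
  intro xs n _ _ hd
  exact pv_tight xs n hd
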